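-- pv_equiv track=rewrite | github.com/hansalemaos/pdferli | __init__.py | password_gen
-- ===== SOURCE A (Python) =====
-- import itertools
--
-- def password_gen(chars,minlen=None,maxlen=None):
--     chars=list(map(str,chars))
--     if not minlen:
--         minlen=1
--     if not maxlen:
--         maxlen = len(chars)+1
--     for no in range(minlen, maxlen, 1):
--         for charlst in (itertools.product(chars, repeat=no)):
--             yield charlst
-- ===== SOURCE B (Python) =====
-- def password_gen(chars, minlen=None, maxlen=None):
--     chars = [str(c) for c in chars]
--     lo = minlen or 1
--     hi = maxlen or len(chars) + 1
--     if lo >= hi: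
--         return
--     level = [()]
--     if lo <= 0:
--         yield from level
--     for n in range(1, hi):
--         level = [t + (c,) for t in level for c in chars]
--         if n >= lo:
--             yield from level
-- ===== Notes on version B (the rewrite author's own statement) =====
-- stated objective: alternative
-- what changed: Replaces the per-length calls to itertools.product (which rebuild each length's tuples from scratch, recursing on the leftmost position) by a single incremental level-by-level sweep: one running list of tuples is extended on the right by one character per level, and the levels inside [minlen, maxlen) are yielded as they are produced.
import Mathlib
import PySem

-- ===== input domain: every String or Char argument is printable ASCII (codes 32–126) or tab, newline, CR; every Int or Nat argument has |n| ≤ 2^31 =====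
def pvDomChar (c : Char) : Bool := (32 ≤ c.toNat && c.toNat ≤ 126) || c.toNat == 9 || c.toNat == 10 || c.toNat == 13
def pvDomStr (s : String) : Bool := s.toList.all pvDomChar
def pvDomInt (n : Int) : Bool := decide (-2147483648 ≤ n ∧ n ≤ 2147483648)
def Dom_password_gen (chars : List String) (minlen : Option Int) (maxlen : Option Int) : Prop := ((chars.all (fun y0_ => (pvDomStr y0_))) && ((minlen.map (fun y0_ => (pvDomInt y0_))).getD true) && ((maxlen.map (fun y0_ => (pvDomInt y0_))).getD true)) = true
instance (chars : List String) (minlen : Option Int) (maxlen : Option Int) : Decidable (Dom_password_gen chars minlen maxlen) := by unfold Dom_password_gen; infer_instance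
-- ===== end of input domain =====

-- B replaces per-length itertools.product calls by one incremental level-by-level sweep
-- (alternative decomposition, not claimed faster). Both ports return the generator's
-- yields collected into a list.

-- ===== PORT A =====
-- 'if not minlen: minlen = 1' — falsy is None or 0 (same for maxlen, default len(chars)+1)
def pvEffMin (minlen : Option Int) : Int :=
  match minlen with
  | none => 1
  | some v => if v = 0 then 1 else v

def pvEffMax (chars : List String) (maxlen : Option Int) : Int :=
  match maxlen with
  | none => (chars.length : Int) + 1
  | some v => if v = 0 then (chars.length : Int) + 1 else v

-- itertools.product(chars, repeat=n): recursion on the leftmost position (hand port, exact)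
def prodRepA (chars : List String) : Nat → List (List String)
  | 0 => [[]]
  | n + 1 => chars.flatMap (fun c => (prodRepA chars n).map (fun t => c :: t))

def password_gen (chars : List String) (minlen : Option Int) (maxlen : Option Int) : List (List String) :=
  let cs := chars.map (fun s => s)   -- list(map(str, chars)); str is identity on str
  let m := pvEffMin minlen
  let M := pvEffMax cs maxlen
  -- for negative no Python's product raises ValueError (excluded by Pre_); guard keeps the port total
  (PySem.List.pyRange m M 1).foldl
    (fun acc no => acc ++ (if 0 ≤ no then prodRepA cs no.toNat else [])) []

-- ===== PORT B =====
-- level = [t + (c,) for t in level for c in chars]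
def altExtend (chars : List String) (level : List (List String)) : List (List String) :=
  level.flatMap (fun t => chars.map (fun c => t ++ [c]))

-- 'for n in range(1, hi): level = extend; if n >= lo: yield from level' (fuel = (hi-1).toNat)
def altLoop (chars : List String) (lo : Int) : Nat → Int → List (List String) → List (List String)
  | 0, _, _ => []
  | k + 1, n, level =>
      let level' := altExtend chars level
      (if lo ≤ n then level' else []) ++ altLoop chars lo k (n + 1) level'

def password_gen_alt (chars : List String) (minlen : Option Int) (maxlen : Option Int) : List (List String) :=
  let cs := chars.map (fun s => s)
  let lo := pvEffMin minlen
  let hi := pvEffMax cs maxlen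
  if hi ≤ lo then []
  else (if lo ≤ 0 then [[]] else []) ++ altLoop cs lo (hi - 1).toNat 1 [[]]

-- ===== PRECONDITION & SPEC =====
-- Pre_ excludes exactly the inputs where A raises ValueError: a negative effective minlen
-- reached by a non-empty range (itertools.product with negative repeat).
def Pre_password_gen (chars : List String) (minlen : Option Int) (maxlen : Option Int) : Prop :=
  0 ≤ pvEffMin minlen ∨ pvEffMax chars maxlen ≤ pvEffMin minlen

instance (chars : List String) (minlen : Option Int) (maxlen : Option Int) : Decidable (Pre_password_gen chars minlen maxlen) := by
  unfold Pre_password_gen; infer_instance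

def pvWitness_password_gen : List String × Option Int × Option Int := (["a", "b"], none, none)

def Spec_password_gen (chars : List String) (minlen : Option Int) (maxlen : Option Int) (out : List (List String)) : Prop := out = password_gen_alt chars minlen maxlen
instance (chars : List String) (minlen : Option Int) (maxlen : Option Int) (out : List (List String)) : Decidable (Spec_password_gen chars minlen maxlen out) := by unfold Spec_password_gen; infer_instance

-- ===== CLAIM (what is proved, stated in full; the proofs are below) =====
def Claim_equal_password_gen : Prop := ∀ (chars : List String) (minlen : Option Int) (maxlen : Option Int), Dom_password_gen chars minlen maxlen → Pre_password_gen chars minlen maxlen → Spec_password_gen chars minlen maxlen (password_gen chars minlen maxlen)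

-- ===== LEMMAS AND PROOFS =====

-- extending on the right of every tuple = product with one more (leftmost-recursed) position
theorem prodRepA_succ_right (cs : List String) (n : Nat) :
    prodRepA cs (n + 1) = altExtend cs (prodRepA cs n) := by
  induction n with
  | zero =>
      simp only [prodRepA, altExtend, List.flatMap_singleton]
      induction cs <;> simp_all
  | succ n ih =>
      show cs.flatMap (fun c => (prodRepA cs (n + 1)).map (fun t => c :: t))
        = altExtend cs (cs.flatMap (fun c => (prodRepA cs n).map (fun t => c :: t)))
      conv_lhs => rw [ih]
      simp [altExtend, List.flatMap_map, List.map_flatMap, List.map_map,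
        List.flatMap_assoc, Function.comp_def]

theorem altLoop_eq (cs : List String) (lo : Int) (k : Nat) :
    ∀ (n : Nat), altLoop cs lo k ((n : Int) + 1) (prodRepA cs n)
      = (List.range' (n + 1) k).flatMap (fun (i : Nat) => if lo ≤ (i : Int) then prodRepA cs i else []) := by
  induction k with
  | zero => intro n; simp [altLoop]
  | succ k ih =>
      intro n
      have h1 : ((n : Int) + 1 + 1) = ((n + 1 : Nat) : Int) + 1 := by push_cast; ring
      simp only [altLoop, ← prodRepA_succ_right, h1, ih (n + 1), List.range'_succ,
        List.flatMap_cons]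
      push_cast
      rfl

theorem flatMap_range_shift {α : Type} (g : Nat → List α) (a b : Nat) :
    (List.range b).flatMap (fun k => if a ≤ k then g k else [])
      = (List.range (b - a)).flatMap (fun j => g (a + j)) := by
  induction b with
  | zero => simp
  | succ b ih =>
      by_cases h : a ≤ b
      · have hb : b + 1 - a = (b - a) + 1 := by omega
        have hg : a + (b - a) = b := by omega
        simp [List.range_succ, hb, ih, h, hg]
      · have hb : b + 1 - a = 0 := by omega
        have hb' : b - a = 0 := by omega
        rw [hb' ] at ih
        simp [List.range_succ, hb, ih, h]

-- ===== VERDICT (by name: the statement is the Claim_ definition above) =====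
theorem password_gen_spec : Claim_equal_password_gen := by
  intro chars minlen maxlen _ hpre
  unfold Spec_password_gen password_gen password_gen_alt
  simp only [List.map_id']
  set m := pvEffMin minlen with hm
  set M := pvEffMax chars maxlen with hM
  rw [PySem.List.foldl_append_eq_flatMap, List.nil_append]
  by_cases hML : M ≤ m
  · -- empty range : both sides are []
    rw [PySem.List.pyRange_one_eq_nil hML, if_pos hML]
    simp
  · have h0 : 0 ≤ m := by
      rcases hpre with h | h
      · exact h
      · exact absurd h hML
    have hM1 : M.toNat = (M - 1).toNat + 1 := by omega
    rw [if_neg hML]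
    have hB2 : (if m ≤ 0 then ([[]] : List (List String)) else []) ++ altLoop chars m (M - 1).toNat 1 [[]]
        = (List.range M.toNat).flatMap (fun (i : Nat) => if m ≤ (i : Int) then prodRepA chars i else []) := by
      have hl := altLoop_eq chars m (M - 1).toNat 0
      have hc : (((0 : Nat) : Int) + 1) = (1 : Int) := by norm_num
      rw [hc] at hl
      rw [show ([[]] : List (List String)) = prodRepA chars 0 from rfl, hl,
        List.range_eq_range', hM1, List.range'_succ, List.flatMap_cons]
      rfl
    rw [hB2]
    -- A side : shift pyRange m M to the common range
    have hMn : (M - m).toNat = M.toNat - m.toNat := by omega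
    rw [PySem.List.pyRange_one, List.flatMap_map, hMn]
    have hL : (List.range (M.toNat - m.toNat)).flatMap
        (fun (a : Nat) => if 0 ≤ m + (a : Int) then prodRepA chars (m + (a : Int)).toNat else [])
        = (List.range (M.toNat - m.toNat)).flatMap (fun j => prodRepA chars (m.toNat + j)) := by
      apply List.flatMap_congr
      intro k _
      have hpos : 0 ≤ m + (k : Int) := by omega
      have htn : (m + (k : Int)).toNat = m.toNat + k := by omega
      simp [hpos, htn]
    rw [hL, ← flatMap_range_shift (fun j => prodRepA chars j) m.toNat M.toNat]
    apply List.flatMap_congr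
    intro k _
    by_cases h : m.toNat ≤ k
    · rw [if_pos h, if_pos (by omega)]
    · rw [if_neg h, if_neg (by omega)]
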